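-- pv_equiv track=rewrite | github.com/ThomasSanna/109-python-problems-for-ccps | 7-colour-trio/7.py | colour_trio
-- ===== SOURCE A (Python) =====
-- def colour_trio(colours):
--     if len(colours) == 1:
--         return colours
--
--     colourAfter = ''
--
--     for i in range (len(colours)-1):
--         if colours[i] == colours[i+1]:
--             colourAfter += colours[i]
--         elif (colours[i] in ('r', 'b')) and (colours[i+1] in ('r', 'b')):
--             colourAfter += 'y'
--         elif (colours[i] in ('y', 'b')) and (colours[i+1] in ('y', 'b')):
--             colourAfter += 'r'
--         else :
--             colourAfter += 'b'
--     return colour_trio(colourAfter)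
-- ===== SOURCE B (Python) =====
-- def _mix(a, b):
--     if a == b:
--         return a
--     if a in 'rb' and b in 'rb':
--         return 'y'
--     if a in 'yb' and b in 'yb':
--         return 'r'
--     return 'b'
--
--
-- def colour_trio(colours):
--     # Online DP along one diagonal of the reduction triangle: after reading a
--     # prefix, col[i] is the single colour that the suffix prefix[i:] reduces to,
--     # so the answer is col[0] once the whole string has been read.
--     col = []
--     for ch in colours:
--         col.append(ch)
--         for i in range(len(col) - 2, -1, -1):
--             col[i] = _mix(col[i], col[i + 1])
--     return col[0]
-- ===== Notes on version B (the rewrite author's own statement) =====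
-- stated objective: alternative
-- what changed: Replaced A's repeated whole-string combining passes with tail recursion by a single left-to-right online DP along one diagonal of the reduction triangle: one array col where col[i] is the colour the current suffix reduces to, updated in place per input character; Pre_ excludes only the empty string, on which A recurses forever.
import Mathlib
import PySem

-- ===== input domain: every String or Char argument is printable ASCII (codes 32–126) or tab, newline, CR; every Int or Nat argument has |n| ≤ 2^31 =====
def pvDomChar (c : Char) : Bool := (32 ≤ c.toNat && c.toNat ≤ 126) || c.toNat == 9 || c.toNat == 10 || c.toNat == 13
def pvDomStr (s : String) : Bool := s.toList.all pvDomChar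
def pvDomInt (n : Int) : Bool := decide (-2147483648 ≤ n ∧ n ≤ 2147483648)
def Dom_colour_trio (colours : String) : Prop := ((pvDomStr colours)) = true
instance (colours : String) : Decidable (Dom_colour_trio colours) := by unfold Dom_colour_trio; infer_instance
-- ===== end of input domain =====

-- B replaces A's repeated whole-string combining passes (with tail recursion) by a single
-- left-to-right online DP along one diagonal of the reduction triangle (objective: alternative).


-- ===== PORT A =====
-- one combining pass: the body of A's `for i in range(len(colours)-1)` loop, pair by pair
def passA : List Char → List Char
  | c1 :: c2 :: rest =>
      (if c1 = c2 then c1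
       else if (c1 = 'r' ∨ c1 = 'b') ∧ (c2 = 'r' ∨ c2 = 'b') then 'y'
       else if (c1 = 'y' ∨ c1 = 'b') ∧ (c2 = 'y' ∨ c2 = 'b') then 'r'
       else 'b') :: passA (c2 :: rest)
  | _ => []

-- needed by goA's termination proof
theorem passA_length (l : List Char) : (passA l).length = l.length - 1 := by
  induction l with
  | nil => simp [passA]
  | cons a t ih =>
    cases t with
    | nil => simp [passA]
    | cons b r => simp [passA] at ih ⊢; omega

-- A's recursion `return colour_trio(colourAfter)`; the `≤ 1` guard also stops on "", where the
-- Python recurses forever (outside Pre_)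
def goA (l : List Char) : List Char :=
  if l.length ≤ 1 then l
  else goA (passA l)
termination_by l.length
decreasing_by
  rw [passA_length]; omega

def colour_trio (colours : String) : String :=
  String.ofList (goA colours.toList)

-- ===== PORT B =====
-- _mix: B's combining rule for two adjacent characters (`a in 'rb'` on a single
-- char is exactly membership in {'r','b'})
def mixB (a b : Char) : Char :=
  if a = b then a
  else if (a = 'r' ∨ a = 'b') ∧ (b = 'r' ∨ b = 'b') then 'y'
  else if (a = 'y' ∨ a = 'b') ∧ (b = 'y' ∨ b = 'b') then 'r'
  else 'b'

-- the inner loop `for i in range(len(col) - 2, -1, -1): col[i] = _mix(col[i], col[i+1])`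
-- as the obvious structural recursion: the downward index loop reads col[i+1] AFTER it was
-- updated, i.e. each cell is combined with the already-updated cell below it
def updB : List Char → List Char
  | [] => []
  | [x] => [x]
  | x :: y :: rest =>
      let r := updB (y :: rest)
      mixB x (r.headD y) :: r

-- one iteration of the outer `for ch in colours` loop: `col.append(ch)` then the inner loop
def stepB (col : List Char) (ch : Char) : List Char := updB (col ++ [ch])

def colour_trio_alt (colours : String) : String :=
  let col := colours.toList.foldl stepB []
  -- `return col[0]`: IndexError on "" (outside Pre_), so the getD default is unreachable
  String.ofList [(PySem.List.pyGet? col 0).getD 'r']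

-- ===== PRECONDITION & SPEC =====
-- Pre_ excludes only the empty string: there A recurses forever (RecursionError) and B's
-- `col[0]` raises IndexError.
def Pre_colour_trio (colours : String) : Prop := colours ≠ ""
instance (colours : String) : Decidable (Pre_colour_trio colours) := by
  unfold Pre_colour_trio; infer_instance

def pvWitness_colour_trio : String := "rybry"

def Spec_colour_trio (colours : String) (out : String) : Prop := out = colour_trio_alt colours
instance (colours : String) (out : String) : Decidable (Spec_colour_trio colours out) := by
  unfold Spec_colour_trio; infer_instance

-- ===== CLAIM (what is proved, stated in full; the proofs are below) =====
def Claim_equal_colour_trio : Prop :=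
  ∀ (colours : String), Dom_colour_trio colours → Pre_colour_trio colours →
    Spec_colour_trio colours (colour_trio colours)

-- ===== LEMMAS AND PROOFS =====

-- the single colour A's pass-recursion reduces a nonempty list to
def redA (l : List Char) : Char := (goA l).headD 'r'

-- col[i] of B's invariant: the reduction of each nonempty suffix
def suffRed : List Char → List Char
  | [] => []
  | x :: t => redA (x :: t) :: suffRed t

theorem passA_cons (a b : Char) (r : List Char) :
    passA (a :: b :: r) = mixB a b :: passA (b :: r) := rfl

theorem goA_singleton (c : Char) : goA [c] = [c] := by rw [goA]; simp

theorem goA_step (l : List Char) (h : 2 ≤ l.length) : goA l = goA (passA l) := by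
  rw [goA, if_neg (by omega)]

theorem redA_singleton (c : Char) : redA [c] = c := by
  unfold redA; rw [goA_singleton]; rfl

theorem goA_eq_redA (l : List Char) (h : l ≠ []) : goA l = [redA l] := by
  induction l using goA.induct with
  | case1 l h1 =>
    obtain ⟨c, rfl⟩ : ∃ c, l = [c] := by
      cases l with
      | nil => exact absurd rfl h
      | cons a t => cases t with
        | nil => exact ⟨a, rfl⟩
        | cons b r => simp at h1
    rw [goA_singleton, redA_singleton]
  | case2 l h1 ih =>
    have hp : passA l ≠ [] := by
      have := passA_length l
      intro hn; rw [hn] at this; simp at this; omega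
    rw [goA_step l (by omega), ih hp]
    unfold redA
    rw [goA_step l (by omega)]

theorem redA_pass (l : List Char) (h : 2 ≤ l.length) : redA l = redA (passA l) := by
  unfold redA; rw [goA_step l h]

-- appending a char to a pass: the new last cell combines the old last char with it
theorem passA_snoc (l : List Char) (h : l ≠ []) (c : Char) :
    passA (l ++ [c]) = passA l ++ [mixB (l.getLastD 'r') c] := by
  induction l with
  | nil => exact absurd rfl h
  | cons a t ih =>
    cases t with
    | nil => rfl
    | cons b r =>
      have := ih (by simp)
      simp only [List.cons_append] at this ⊢
      rw [passA_cons, this, passA_cons]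
      simp

-- the triangle recurrence: the reduction of l ++ [c] combines the reduction of l with
-- the reduction of l.tail ++ [c]
theorem red_step : ∀ (n : Nat) (l : List Char), l.length = n → l ≠ [] → ∀ c : Char,
    redA (l ++ [c]) = mixB (redA l) (redA (l.tail ++ [c])) := by
  intro n
  induction n using Nat.strong_induction_on with
  | _ n ih =>
  intro l hn hne c
  cases l with
  | nil => exact absurd rfl hne
  | cons x t =>
  cases t with
  | nil =>
    show redA [x, c] = mixB (redA [x]) (redA [c])
    rw [redA_singleton, redA_singleton, redA_pass [x, c] (by simp), passA_cons]
    show redA [mixB x c] = _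
    rw [redA_singleton]
  | cons y r =>
    set l := x :: y :: r with hl
    have h2 : 2 ≤ l.length := by simp [hl]
    have hlc2 : 2 ≤ (l ++ [c]).length := by simp [hl]
    have hplne : passA l ≠ [] := by
      have := passA_length l
      intro hz; rw [hz] at this; simp at this; omega
    rw [redA_pass (l ++ [c]) hlc2, passA_snoc l (by simp [hl]) c]
    have hplen : (passA l).length = n - 1 := by rw [passA_length, hn]
    have hrec := ih (n - 1) (by omega) (passA l) hplen hplne (mixB (l.getLastD 'r') c)
    rw [hrec]
    -- tail (passA l) = passA (tail l), and the appended cell matches passA_snoc on tail l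
    have htail : (passA l).tail = passA (y :: r) := by rw [hl, passA_cons]; rfl
    have hlast : l.getLastD 'r' = (y :: r).getLastD 'r' := by simp [hl]
    rw [htail, hlast, ← passA_snoc (y :: r) (by simp) c]
    rw [← redA_pass ((y :: r) ++ [c]) (by simp), ← redA_pass l h2]
    rfl

theorem suffRed_headD (l : List Char) (h : l ≠ []) (d : Char) :
    (suffRed l).headD d = redA l := by
  cases l with
  | nil => exact absurd rfl h
  | cons x t => rfl

-- one outer-loop iteration preserves B's invariant
theorem updB_suffRed (p : List Char) (c : Char) :
    updB (suffRed p ++ [c]) = suffRed (p ++ [c]) := by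
  induction p with
  | nil =>
    show updB [c] = suffRed [c]
    rw [show suffRed [c] = [redA [c]] from rfl, redA_singleton]
    rfl
  | cons x t ih =>
    have hne : suffRed t ++ [c] ≠ [] := by simp
    obtain ⟨y, rest, hyr⟩ : ∃ y rest, suffRed t ++ [c] = y :: rest := by
      cases hx : suffRed t ++ [c] with
      | nil => exact absurd hx hne
      | cons y rest => exact ⟨y, rest, rfl⟩
    show updB (redA (x :: t) :: (suffRed t ++ [c])) = suffRed ((x :: t) ++ [c])
    rw [hyr, updB, ← hyr, ih]
    have hhead : (suffRed (t ++ [c])).headD y = redA (t ++ [c]) :=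
      suffRed_headD (t ++ [c]) (by simp) y
    rw [hhead]
    show mixB (redA (x :: t)) (redA (t ++ [c])) :: suffRed (t ++ [c])
        = redA ((x :: t) ++ [c]) :: suffRed (t ++ [c])
    rw [red_step (x :: t).length (x :: t) rfl (by simp) c]
    rfl

-- B's fold builds exactly the suffix reductions of the prefix read so far
theorem foldl_stepB (p : List Char) : p.foldl stepB [] = suffRed p := by
  induction p using List.reverseRecOn with
  | nil => rfl
  | append_singleton p c ih =>
    rw [List.foldl_append, ih]
    show stepB (suffRed p) c = _
    unfold stepB
    exact updB_suffRed p c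

-- ===== VERDICT (by name: the statement is the Claim_ definition above) =====
theorem colour_trio_spec : Claim_equal_colour_trio := by
  intro colours _ hne
  unfold Spec_colour_trio
  have hlne : colours.toList ≠ [] := by
    intro h
    apply hne
    rw [← String.ofList_toList (s := colours), h]
  rw [colour_trio, colour_trio_alt, goA_eq_redA colours.toList hlne]
  rw [foldl_stepB]
  obtain ⟨x, t, hxt⟩ : ∃ x t, colours.toList = x :: t := by
    cases h : colours.toList with
    | nil => exact absurd h hlne
    | cons x t => exact ⟨x, t, rfl⟩
  rw [hxt]
  show String.ofList [redA (x :: t)]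
      = String.ofList [(PySem.List.pyGet? (redA (x :: t) :: suffRed t) 0).getD 'r']
  simp [PySem.List.pyGet?, PySem.List.pyIdx?]
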